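-- pv_equiv track=rewrite | github.com/kyle65463/CS-265 | final/rle.py | redundant_load_elimination_meet
-- ===== SOURCE A (Python) =====
-- def redundant_load_elimination_meet(preds):
--     if not preds:
--         return {}
--     result = preds[0].copy()
--     for pred in preds[1:]:
--         keys = set(result.keys()) | set(pred.keys())
--         for l in keys:
--             v1 = result.get(l, None)
--             v2 = pred.get(l, None)
--             if v1 == v2 and v1 is not None:
--                 continue
--             else:
--                 if l in result:
--                     del result[l]
--     return result
-- ===== SOURCE B (Python) =====
-- def redundant_load_elimination_meet(preds):
--     if not preds:
--         return {}
--     need = len(preds) - 1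
--     counts = {}
--     for pred in preds[1:]:
--         for item in pred.items():
--             counts[item] = counts.get(item, 0) + 1
--     return {l: v for l, v in preds[0].items() if counts.get((l, v), 0) == need}
-- ===== Notes on version B (the rewrite author's own statement) =====
-- stated objective: alternative
-- what changed: Replaces the fold of per-predecessor intersections (union key set, in-place deletions) by a two-stage counting algorithm: one pass builds a counter over all (key,value) items of preds[1:], then a single filter over preds[0] keeps entries whose count equals len(preds)-1.
import Mathlib
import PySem

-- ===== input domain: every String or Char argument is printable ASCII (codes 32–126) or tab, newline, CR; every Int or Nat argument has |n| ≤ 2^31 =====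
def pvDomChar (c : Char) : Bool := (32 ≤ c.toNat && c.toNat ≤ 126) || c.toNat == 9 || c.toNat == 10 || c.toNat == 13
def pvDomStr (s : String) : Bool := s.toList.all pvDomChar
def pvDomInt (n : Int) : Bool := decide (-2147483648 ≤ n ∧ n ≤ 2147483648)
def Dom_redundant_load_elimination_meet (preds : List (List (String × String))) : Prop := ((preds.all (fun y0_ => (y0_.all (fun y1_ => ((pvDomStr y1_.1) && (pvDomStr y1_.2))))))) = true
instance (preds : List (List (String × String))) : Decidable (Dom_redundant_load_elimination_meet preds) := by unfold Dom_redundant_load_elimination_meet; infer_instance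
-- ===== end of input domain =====

-- B replaces A's fold of per-predecessor union-scan intersections by a two-stage counting
-- algorithm: build a counter over all items of preds[1:], then filter preds[0] once
-- (objective: alternative).


-- ===== PORT A =====
-- d.get(k, None) on an association-list dict: first (= only, under unique keys) match
def pvGet (d : List (String × String)) (k : String) : Option String :=
  (d.find? (fun kv => kv.1 == k)).map (fun kv => kv.2)

-- one inner-loop iteration of A: the body for one key l of the union set
-- ('del result[l]' on a unique-keyed dict drops that key's entry; exact under Pre_)
def pvStepA (pred : List (String × String)) (result : List (String × String)) (l : String) : List (String × String) :=
  let v1 := pvGet result l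
  let v2 := pvGet pred l
  if v1 == v2 && v1.isSome then result
  else if (result.map Prod.fst).contains l then result.filter (fun kv => kv.1 != l) else result

-- Python iterates the union SET in hash order; each iteration deletes only the key it visits,
-- so the resulting dict is independent of that order: we iterate in Set insertion order.
def redundant_load_elimination_meet (preds : List (List (String × String))) : List (String × String) :=
  match preds with
  | [] => []
  | p :: rest =>
    rest.foldl (fun result pred =>
      let keys := PySem.Set.union (PySem.Set.ofList (result.map Prod.fst)) (pred.map Prod.fst)
      keys.foldl (pvStepA pred) result) p

-- ===== PORT B =====
def redundant_load_elimination_meet_alt (preds : List (List (String × String))) : List (String × String) :=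
  match preds with
  | [] => []
  | p :: rest =>
    let need : Int := rest.length
    let counts : PySem.Dict (String × String) Int :=
      rest.foldl (fun c pred =>
        pred.foldl (fun c item => c.insert item (c.getD item 0 + 1)) c) PySem.Dict.empty
    p.filter (fun lv => counts.getD lv 0 == need)

-- ===== PRECONDITION & SPEC =====
-- Pre_ excludes association lists with duplicate keys: those encode no Python dict at all
-- (A's inputs are dicts), so nothing of A's actual input space is excluded.
def Pre_redundant_load_elimination_meet (preds : List (List (String × String))) : Prop :=
  ∀ d ∈ preds, (d.map Prod.fst).Nodup
instance (preds : List (List (String × String))) : Decidable (Pre_redundant_load_elimination_meet preds) := by unfold Pre_redundant_load_elimination_meet; infer_instance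
def pvWitness_redundant_load_elimination_meet : (List (List (String × String))) :=
  [[("a", "1"), ("b", "2")], [("a", "1"), ("c", "3")]]

def Spec_redundant_load_elimination_meet (preds : List (List (String × String))) (out : List (String × String)) : Prop := out = redundant_load_elimination_meet_alt preds
instance (preds : List (List (String × String))) (out : List (String × String)) : Decidable (Spec_redundant_load_elimination_meet preds out) := by unfold Spec_redundant_load_elimination_meet; infer_instance

-- ===== CLAIM (what is proved, stated in full; the proofs are below) =====
def Claim_equal_redundant_load_elimination_meet : Prop := ∀ (preds : List (List (String × String))), Dom_redundant_load_elimination_meet preds → Pre_redundant_load_elimination_meet preds → Spec_redundant_load_elimination_meet preds (redundant_load_elimination_meet preds)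

-- ===== LEMMAS AND PROOFS =====

-- under unique keys, membership determines the lookup
theorem pvGet_of_mem {d : List (String × String)} {l v : String}
    (hnd : (d.map Prod.fst).Nodup) (hm : (l, v) ∈ d) : pvGet d l = some v := by
  induction d with
  | nil => cases hm
  | cons kv d ih =>
    simp only [List.map_cons, List.nodup_cons] at hnd
    rcases List.mem_cons.mp hm with h | h
    · subst h; simp [pvGet]
    · have hne : kv.1 ≠ l := by
        intro he
        exact hnd.1 (he ▸ (List.mem_map.mpr ⟨(l, v), h, rfl⟩))
      have hb : (kv.1 == l) = false := beq_eq_false_iff_ne.mpr hne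
      simp only [pvGet, List.find?_cons, hb]
      exact ih hnd.2 h

theorem mem_of_pvGet {d : List (String × String)} {l v : String}
    (h : pvGet d l = some v) : (l, v) ∈ d := by
  unfold pvGet at h
  rcases hf : d.find? (fun kv => kv.1 == l) with _ | kv
  · rw [hf] at h; cases h
  · rw [hf] at h
    have hm := List.mem_of_find?_eq_some hf
    have hp := List.find?_some hf
    have h2 : kv.2 = v := by simpa using h
    have h1 : kv.1 = l := by simpa using hp
    have : kv = (l, v) := Prod.ext h1 h2
    exact this ▸ hm

theorem mem_fst_of_mem {d : List (String × String)} {lv : String × String}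
    (h : lv ∈ d) : lv.1 ∈ d.map Prod.fst :=
  List.mem_map.mpr ⟨lv, h, rfl⟩

-- inner loop of A = a filter keeping entries whose key is outside ks or agrees with pred
theorem innerA_eq_filter (pred : List (String × String)) :
    ∀ (ks : List String) (result : List (String × String)),
      (result.map Prod.fst).Nodup →
      ks.foldl (pvStepA pred) result
        = result.filter (fun lv => !ks.contains lv.1 || (pvGet pred lv.1 == some lv.2)) := by
  intro ks
  induction ks with
  | nil => intro result _; simp
  | cons l ks ih =>
    intro result hnd
    simp only [List.foldl_cons]
    by_cases hc : (pvGet result l == pvGet pred l && (pvGet result l).isSome) = true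
    · rw [show pvStepA pred result l = result by simp [pvStepA, hc]]
      rw [ih result hnd]
      refine List.filter_congr ?_
      intro lv hm
      by_cases hl : lv.1 = l
      · have hv1 : pvGet result l = some lv.2 := hl ▸ pvGet_of_mem hnd hm
        have := (Bool.and_eq_true ..).mp hc
        have hv2 : pvGet pred l = some lv.2 := by
          have := beq_iff_eq.mp this.1
          rw [← this, hv1]
        simp [hl, hv2]
      · simp [hl]
    · -- delete branch (a no-op filter when l is absent)
      have hstep : pvStepA pred result l = result.filter (fun kv => kv.1 != l) := by
        by_cases hin : ((result.map Prod.fst).contains l) = true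
        · simp only [pvStepA]
          rw [if_neg hc, if_pos hin]
        · simp only [pvStepA]
          rw [if_neg hc, if_neg hin]
          symm
          refine List.filter_eq_self.mpr ?_
          intro lv hm
          have hne : lv.1 ≠ l := by
            intro he
            exact hin (List.contains_iff_mem.mpr (he ▸ mem_fst_of_mem hm))
          simpa using hne
      rw [hstep]
      have hnd' : ((result.filter (fun kv => kv.1 != l)).map Prod.fst).Nodup :=
        (List.Sublist.map Prod.fst List.filter_sublist).nodup hnd
      rw [ih _ hnd', List.filter_filter]
      refine List.filter_congr ?_
      intro lv hm
      by_cases hl : lv.1 = l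
      · have hv1 : pvGet result l = some lv.2 := hl ▸ pvGet_of_mem hnd hm
        have hv2 : (pvGet pred l == some lv.2) = false := by
          rcases hb : (pvGet pred l == some lv.2) with _ | _
          · rfl
          · exfalso
            apply hc
            rw [hv1, beq_iff_eq.mp hb]
            simp
        simp [hl, hv2]
      · simp [hl, bne_iff_ne]

-- one outer iteration of A equals a filter by agreement with pred
theorem stepA_eq_filter (result pred : List (String × String))
    (hnd : (result.map Prod.fst).Nodup) :
    (PySem.Set.union (PySem.Set.ofList (result.map Prod.fst)) (pred.map Prod.fst)).foldl
        (pvStepA pred) result = result.filter (fun lv => pvGet pred lv.1 == some lv.2) := by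
  rw [innerA_eq_filter pred _ result hnd]
  refine List.filter_congr ?_
  intro lv hm
  have hk : lv.1 ∈ PySem.Set.union (PySem.Set.ofList (result.map Prod.fst)) (pred.map Prod.fst) := by
    rw [PySem.Set.mem_union]
    exact Or.inl (by rw [PySem.Set.mem_ofList]; exact mem_fst_of_mem hm)
  simp [hk]

theorem filter_nodup {a : List (String × String)} (q : String × String → Bool)
    (h : (a.map Prod.fst).Nodup) : ((a.filter q).map Prod.fst).Nodup :=
  (List.Sublist.map Prod.fst List.filter_sublist).nodup h

-- A's whole outer loop = one filter of p by agreement with every pred of rest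
theorem foldlA_eq_filter_all (rest : List (List (String × String))) :
    ∀ p : List (String × String), (p.map Prod.fst).Nodup →
      rest.foldl (fun result pred =>
          (PySem.Set.union (PySem.Set.ofList (result.map Prod.fst)) (pred.map Prod.fst)).foldl
            (pvStepA pred) result) p
        = p.filter (fun lv => rest.all (fun pred => pvGet pred lv.1 == some lv.2)) := by
  induction rest with
  | nil => intro p _; simp
  | cons pred rest ih =>
    intro p hnd
    simp only [List.foldl_cons]
    rw [stepA_eq_filter p pred hnd, ih _ (filter_nodup _ hnd), List.filter_filter]
    refine List.filter_congr ?_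
    intro lv _
    simp [List.all_cons, Bool.and_comm]

-- B's counter: its count of lv is the total number of occurrences of lv in rest
theorem counts_getD (rest : List (List (String × String))) (lv : String × String) :
    ∀ c : PySem.Dict (String × String) Int,
      (rest.foldl (fun c pred =>
          pred.foldl (fun c item => c.insert item (c.getD item 0 + 1)) c) c).getD lv 0
        = c.getD lv 0 + ((rest.map (fun pred => (pred.count lv : Int))).sum) := by
  induction rest with
  | nil => intro c; simp
  | cons pred rest ih =>
    intro c
    simp only [List.foldl_cons, List.map_cons, List.sum_cons]
    rw [ih, PySem.Dict.getD_foldl_insert_add_one]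
    ring

-- under unique keys an entry occurs at most once, and exactly once iff the lookup agrees
theorem count_eq_ite {pred : List (String × String)} (lv : String × String)
    (hnd : (pred.map Prod.fst).Nodup) :
    (pred.count lv : Int) = if pvGet pred lv.1 == some lv.2 then 1 else 0 := by
  by_cases h : (pvGet pred lv.1 == some lv.2) = true
  · have hm : lv ∈ pred := mem_of_pvGet (beq_iff_eq.mp h)
    have : pred.count lv = 1 := List.count_eq_one_of_mem hnd.of_map hm
    simp [h, this]
  · have hm : lv ∉ pred := by
      intro hm
      exact h (beq_iff_eq.mpr (pvGet_of_mem hnd hm))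
    simp [h, List.count_eq_zero_of_not_mem hm]

-- a sum of 0/1 indicator terms reaches the length exactly when every term is 1
theorem sum_ite_eq_length_iff (rest : List (List (String × String))) (q : List (String × String) → Bool) :
    ((rest.map (fun pred => if q pred then (1 : Int) else 0)).sum == (rest.length : Int))
      = rest.all q := by
  induction rest with
  | nil => simp
  | cons pred rest ih =>
    have hle : (rest.map (fun pred => if q pred then (1 : Int) else 0)).sum ≤ rest.length := by
      clear ih
      induction rest with
      | nil => simp
      | cons x xs ihx =>
        simp only [List.map_cons, List.sum_cons, List.length_cons]
        push_cast
        split_ifs <;> omega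
    simp only [List.map_cons, List.sum_cons, List.length_cons, List.all_cons]
    rw [← ih]
    push_cast
    by_cases hq : q pred = true
    · rw [if_pos hq, hq, Bool.true_and]
      rcases hb : ((rest.map (fun pred => if q pred then (1 : Int) else 0)).sum == ((rest.length : Nat) : Int)) with _ | _
      · rw [beq_eq_false_iff_ne] at hb
        rw [beq_eq_false_iff_ne]
        omega
      · rw [beq_iff_eq] at hb
        rw [beq_iff_eq]
        omega
    · have hqf : q pred = false := eq_false_of_ne_true hq
      rw [if_neg hq, hqf, Bool.false_and, beq_eq_false_iff_ne]
      omega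

-- ===== VERDICT (by name: the statement is the Claim_ definition above) =====
theorem redundant_load_elimination_meet_spec : Claim_equal_redundant_load_elimination_meet := by
  intro preds _ hpre
  unfold Spec_redundant_load_elimination_meet
  cases preds with
  | nil => rfl
  | cons p rest =>
    simp only [redundant_load_elimination_meet, redundant_load_elimination_meet_alt]
    rw [foldlA_eq_filter_all rest p (hpre p (List.mem_cons_self ..))]
    refine List.filter_congr ?_
    intro lv _
    rw [counts_getD rest lv PySem.Dict.empty, PySem.Dict.getD_empty]
    have hmap : rest.map (fun pred => (pred.count lv : Int))
        = rest.map (fun pred => if pvGet pred lv.1 == some lv.2 then (1 : Int) else 0) := by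
      refine List.map_congr_left ?_
      intro pred hm
      exact count_eq_ite lv (hpre pred (List.mem_cons_of_mem _ hm))
    rw [hmap, zero_add]
    exact (sum_ite_eq_length_iff rest (fun pred => pvGet pred lv.1 == some lv.2)).symm
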